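-- pv_equiv track=rewrite | github.com/drlee1218/ChosenOne | 프로그래머스/1/72410. 신규 아이디 추천/신규 아이디 추천.py | solution
-- ===== SOURCE A (Python) =====
-- def solution(new_id):
--     # 1단계
--     new_id = new_id.lower()
--
--     # 2단계
--     answer = ''
--     for word in new_id:
--         if word.isalnum() or word in '-_.':
--             answer += word
--
--     # 3단계
--     while '..' in answer:
--         answer = answer.replace('..', '.')
--
--     # 4단계 (안전하게 수정)
--     if answer and answer[0] == '.':
--         answer = answer[1:]
--     if answer and answer[-1] == '.':
--         answer = answer[:-1]
--
--     # 5단계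
--     if answer == '':
--         answer = 'a'
--
--     # 6단계
--     if len(answer) >= 16:
--         answer = answer[:15]
--         if answer[-1] == '.':
--             answer = answer[:-1]
--
--     # 7단계 (조건 수정)
--     while len(answer) < 3:
--         answer += answer[-1]
--
--     return answer
-- ===== SOURCE B (Python) =====
-- def solution(new_id):
--     # one fused pass: lowercase-filter and dot-collapsing together
--     out = []
--     for c in new_id.lower():
--         if c.isalnum() or c in '-_':
--             out.append(c)
--         elif c == '.' and (not out or out[-1] != '.'):
--             out.append(c)
--     s = ''.join(out).strip('.') or 'a'
--     if len(s) >= 16: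
--         s = s[:15].rstrip('.')
--     return s + s[-1] * (3 - len(s))
-- ===== Notes on version B (the rewrite author's own statement) =====
-- stated objective: simpler
-- what changed: A filters characters in one loop and then repeatedly rescans and rewrites the whole string with str.replace until no adjacent dot pair remains, plus extra while loops for padding; B does the filtering and the dot-run collapsing in a single left-to-right pass (keeping a dot only when the last kept character is not a dot), then uses strip/rstrip and an arithmetic padding formula instead of loops.
import Mathlib
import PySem

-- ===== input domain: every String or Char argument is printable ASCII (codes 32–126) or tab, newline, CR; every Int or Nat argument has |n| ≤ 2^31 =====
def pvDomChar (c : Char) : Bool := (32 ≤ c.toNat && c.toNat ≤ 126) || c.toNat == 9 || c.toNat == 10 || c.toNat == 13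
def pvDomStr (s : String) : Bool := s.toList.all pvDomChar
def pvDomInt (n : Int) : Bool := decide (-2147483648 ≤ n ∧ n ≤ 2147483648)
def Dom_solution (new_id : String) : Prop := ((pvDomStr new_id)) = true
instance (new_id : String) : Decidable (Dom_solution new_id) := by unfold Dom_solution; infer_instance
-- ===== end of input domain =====

-- B fuses A's filter pass and A's repeated '..'-replace passes into one left-to-right pass.

-- ===== PORT A =====

-- effect of one `answer.replace('..', '.')` call, used only to state the
-- termination/characterisation lemmas the while-loop port cites
def pvRep1 : List Char → List Char
  | [] => []
  | c :: t =>
    if c = '.' ∧ t.head? = some '.' then '.' :: pvRep1 t.tail else c :: pvRep1 t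
termination_by s => s.length
decreasing_by all_goals simp

theorem pvReplace_go_eq (fuel : Nat) (l acc : List Char) (h : l.length ≤ fuel) :
    PySem.Chars.replace.go ['.', '.'] ['.'] fuel l acc = acc.reverse ++ pvRep1 l := by
  induction fuel generalizing l acc with
  | zero =>
    have : l = [] := by cases l <;> simp_all
    subst this
    simp [PySem.Chars.replace.go, pvRep1]
  | succ n ih =>
    cases l with
    | nil => simp [PySem.Chars.replace.go, pvRep1]
    | cons c t =>
      rw [PySem.Chars.replace.go]
      by_cases hp : List.isPrefixOf ['.', '.'] (c :: t) = true
      · simp only [hp, if_true]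
        obtain ⟨c2, t', rfl⟩ : ∃ c2 t', t = c2 :: t' := by
          cases t with
          | nil => simp [List.isPrefixOf] at hp
          | cons a b => exact ⟨a, b, rfl⟩
        obtain ⟨rfl, rfl⟩ : '.' = c ∧ '.' = c2 := by
          simp [List.isPrefixOf] at hp; exact ⟨hp.1, hp.2⟩
        simp only [List.length_cons, List.drop_succ_cons, List.length_nil, List.drop_zero]
        rw [ih t' (['.'].reverse ++ acc) (by simp at h ⊢; omega)]
        rw [pvRep1]
        simp
  
      · simp only [hp]
        rw [ih t (c :: acc) (by simp at h ⊢; omega)]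
        rw [pvRep1]
        have hcond : ¬ (c = '.' ∧ t.head? = some '.') := by
          rintro ⟨rfl, hh⟩
          cases t with
          | nil => simp at hh
          | cons a b =>
            simp at hh
            subst hh
            simp [List.isPrefixOf] at hp
        simp [hcond]

theorem pvReplace_eq (cs : List Char) :
    PySem.Chars.replace cs ['.', '.'] ['.'] = pvRep1 cs := by
  rw [PySem.Chars.replace]
  simp only [List.isEmpty_cons]
  exact pvReplace_go_eq cs.length cs [] (le_refl _) |>.trans (by simp)

theorem pvRep1_len_le (s : List Char) : (pvRep1 s).length ≤ s.length := by
  induction s using pvRep1.induct with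
  | case1 => simp [pvRep1]
  | case2 c t hc ih =>
    rw [pvRep1]; simp only [hc]
    cases t with
    | nil => simp at hc
    | cons a b => simp at ih ⊢; omega
  | case3 c t hc ih =>
    rw [pvRep1]; simp only [hc, if_false]
    simpa using ih

theorem pvRep1_len_lt (s : List Char) (h : ['.', '.'] <:+: s) :
    (pvRep1 s).length < s.length := by
  induction s using pvRep1.induct with
  | case1 => simp at h
  | case2 c t hc ih =>
    rw [pvRep1]; simp only [hc]
    cases t with
    | nil => simp at hc
    | cons a b =>
      have := pvRep1_len_le b
      simp at this ⊢
      omega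
  | case3 c t hc ih =>
    rw [pvRep1]; simp only [hc, if_false]
    have ht : ['.', '.'] <:+: t := by
      rcases (List.infix_cons_iff).1 h with hpre | hinf
      · exfalso
        rcases hpre with ⟨r, hr⟩
        cases t with
        | nil => simp at hr
        | cons a b =>
          simp at hr
          exact hc ⟨hr.1.symm, by simp [hr.2.1.symm]⟩
      · exact hinf
    have := ih ht
    simp at this ⊢
    omega

-- step 3: `while '..' in answer: answer = answer.replace('..', '.')`
def pvAcollapse (cs : List Char) : List Char :=
  if _h : PySem.Chars.isIn ['.', '.'] cs = true then
    pvAcollapse (PySem.Chars.replace cs ['.', '.'] ['.'])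
  else cs
termination_by cs.length
decreasing_by
  rw [pvReplace_eq]
  exact pvRep1_len_lt cs ((PySem.Chars.isIn_iff_infix _ _).1 _h)

-- step 7: `while len(answer) < 3: answer += answer[-1]` (answer[-1] of an empty
-- list would raise IndexError in Python; that branch is unreachable and just returns)
def pvApad (a : List Char) : List Char :=
  if a.length < 3 then
    match PySem.List.pyGet? a (-1) with
    | some c => pvApad (a ++ [c])
    | none => a
  else a
termination_by 3 - a.length
decreasing_by simp; omega

def solution (new_id : String) : String :=
  let L := (PySem.Str.lower new_id).toList
  -- step 2
  let a2 := L.foldl (fun acc c =>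
    if PySem.Chars.isalnum c || PySem.Chars.isIn [c] ['-', '_', '.'] then acc ++ [c] else acc) []
  -- step 3
  let a3 := pvAcollapse a2
  -- step 4
  let a4a := if a3 ≠ [] ∧ PySem.List.pyGet? a3 0 = some '.' then PySem.List.slice a3 (some 1) none else a3
  let a4 := if a4a ≠ [] ∧ PySem.List.pyGet? a4a (-1) = some '.' then PySem.List.slice a4a none (some (-1)) else a4a
  -- step 5
  let a5 := if a4 = [] then ['a'] else a4
  -- step 6
  let a6 :=
    if 16 ≤ a5.length then
      let b := PySem.List.slice a5 none (some 15)
      if PySem.List.pyGet? b (-1) = some '.' then PySem.List.slice b none (some (-1)) else b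
    else a5
  -- step 7
  String.ofList (pvApad a6)

-- ===== PORT B =====

-- s.rstrip('.') (exact: drop the trailing run of '.')
def pvBrstripDots (s : List Char) : List Char := (s.reverse.dropWhile (· == '.')).reverse

def solution_alt (new_id : String) : String :=
  -- fused pass: filter + collapse runs of dots in one sweep
  let out := (PySem.Str.lower new_id).toList.foldl (fun out c =>
    if PySem.Chars.isalnum c || PySem.Chars.isIn [c] ['-', '_'] then out ++ [c]
    else if c = '.' ∧ (out = [] ∨ PySem.List.pyGet? out (-1) ≠ some '.') then out ++ [c]
    else out) []
  let t := PySem.Chars.stripChars out ['.']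
  let s := if t = [] then ['a'] else t        -- `or 'a'`
  let s2 := if 16 ≤ s.length then pvBrstripDots (PySem.List.slice s none (some 15)) else s
  -- s + s[-1] * (3 - len(s)); s[-1] of [] would raise IndexError in Python, unreachable here
  match PySem.List.pyGet? s2 (-1) with
  | some c => String.ofList (s2 ++ List.replicate (3 - s2.length) c)
  | none => String.ofList s2

-- ===== PRECONDITION & SPEC =====
def Spec_solution (new_id : String) (out : String) : Prop := out = solution_alt new_id
instance (new_id : String) (out : String) : Decidable (Spec_solution new_id out) := by unfold Spec_solution; infer_instance

-- ===== CLAIM (what is proved, stated in full; the proofs are below) =====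
def Claim_equal_solution : Prop := ∀ (new_id : String), Dom_solution new_id → Spec_solution new_id (solution new_id)

-- ===== LEMMAS AND PROOFS =====

-- canonical left-to-right dot collapser; p = "the previously kept char is a dot"
def pvCol (p : Bool) : List Char → List Char
  | [] => []
  | c :: t => if c = '.' then (if p then pvCol true t else '.' :: pvCol true t) else c :: pvCol false t

def pvNoDD : List Char → Bool
  | [] => true
  | c :: t => (!decide (c = '.' ∧ t.head? = some '.')) && pvNoDD t

theorem pvDD_prefix_iff (c : Char) (t : List Char) :
    (['.', '.'] <+: c :: t) ↔ (c = '.' ∧ t.head? = some '.') := by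
  cases t with
  | nil => simp [List.cons_prefix_cons, eq_comm]
  | cons a b => simp [List.cons_prefix_cons, eq_comm]

theorem pvNoDD_iff (s : List Char) : pvNoDD s = true ↔ ¬ (['.', '.'] <:+: s) := by
  induction s with
  | nil => simp [pvNoDD]
  | cons c t ih =>
    rw [pvNoDD]
    rw [List.infix_cons_iff, pvDD_prefix_iff]
    simp [ih]
    tauto

theorem pvNoDD_of_infix {s t : List Char} (h : pvNoDD s = true) (ht : t <:+: s) :
    pvNoDD t = true := by
  rw [pvNoDD_iff] at *
  exact fun hdd => h (hdd.trans ht)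

theorem pvCol_pvRep1 (s : List Char) : ∀ p, pvCol p (pvRep1 s) = pvCol p s := by
  induction s using pvRep1.induct with
  | case1 => intro p; rw [pvRep1]
  | case2 c t hc ih =>
    intro p
    obtain ⟨rfl, hh⟩ := hc
    cases t with
    | nil => simp at hh
    | cons a b =>
      simp at hh; subst hh
      rw [pvRep1]
      simp only [List.head?_cons, and_self, List.tail_cons, if_pos]
      simp at ih
      cases p with
      | true => simpa [pvCol] using ih.2
      | false => simpa [pvCol] using ih.2
  | case3 c t hc ih =>
    intro p
    rw [pvRep1]
    simp only [hc, if_false]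
    by_cases h : c = '.'
    · subst h
      cases p <;> simp [pvCol, ih]
    · cases p <;> simp [pvCol, h, ih]

theorem pvCol_id (s : List Char) (h : pvNoDD s = true) :
    pvCol false s = s ∧ (s.head? ≠ some '.' → pvCol true s = s) := by
  induction s with
  | nil => simp [pvCol]
  | cons c t ih =>
    rw [pvNoDD] at h
    simp at h
    obtain ⟨h1, h2⟩ := h
    have iht := ih h2
    by_cases hc : c = '.'
    · subst hc
      have hth : t.head? ≠ some '.' := by simpa using h1
      constructor
      · simp [pvCol, iht.2 hth]
      · intro hh; simp at hh
    · constructor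
      · simp [pvCol, hc, iht.1]
      · intro _; simp [pvCol, hc, iht.1]

theorem pvNoDD_pvCol (s : List Char) : ∀ p, pvNoDD (pvCol p s) = true ∧ (p = true → (pvCol p s).head? ≠ some '.') := by
  induction s with
  | nil => intro p; simp [pvCol, pvNoDD]
  | cons c t ih =>
    intro p
    by_cases hc : c = '.'
    · subst hc
      cases p with
      | true => simpa [pvCol] using ih true
      | false =>
        simp only [pvCol, reduceIte]
        constructor
        · simp [pvNoDD, (ih true).1, (ih true).2 rfl]
        · simp
    · constructor
      · simp only [pvCol, hc, if_false]
        simp [pvNoDD, hc, (ih false).1]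
      · intro _
        simp [pvCol, hc]

theorem pvAcollapse_eq (s : List Char) : pvAcollapse s = pvCol false s := by
  induction s using pvAcollapse.induct with
  | case1 s h ih =>
    rw [pvAcollapse]
    simp only [h, dif_pos]
    rw [ih, pvReplace_eq, pvCol_pvRep1]
  | case2 s h =>
    rw [pvAcollapse]
    simp only [h]
    rw [dif_neg (by simp)]
    have : pvNoDD s = true := (pvNoDD_iff s).2 ((PySem.Chars.isIn_eq_false_iff _ _).1 (by simpa using h))
    exact ((pvCol_id s this).1).symm

theorem pvIsIn_singleton (c : Char) (l : List Char) :
    PySem.Chars.isIn [c] l = l.contains c := by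
  rw [PySem.Chars.isIn, PySem.Chars.find]
  suffices h : ∀ k : Nat, (PySem.Chars.find.go [c] l k != -1) = l.contains c by exact h 0
  induction l with
  | nil => intro k; rw [PySem.Chars.find.go]; simp
  | cons a t ih =>
    intro k
    rw [PySem.Chars.find.go]
    by_cases hac : [c].isPrefixOf (a :: t) = true
    · simp [List.isPrefixOf] at hac
      simp [hac]
    · simp [List.isPrefixOf] at hac
      simp [List.isPrefixOf, hac, ih (k+1)]

theorem pvGet_neg_one {α : Type} (l : List α) : PySem.List.pyGet? l (-1) = l.getLast? := by
  cases l with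
  | nil => rfl
  | cons a t => simp [PySem.List.pyGet?, PySem.List.pyIdx?, List.getLast?_eq_getElem?]

theorem pvGet_zero {α : Type} (l : List α) : PySem.List.pyGet? l 0 = l.head? := by
  cases l <;> simp [PySem.List.pyGet?, PySem.List.pyIdx?]

theorem pvSlice_neg_one {α : Type} (l : List α) :
    PySem.List.slice l none (some (-1)) = l.dropLast := by
  cases l with
  | nil => rfl
  | cons a t =>
    simp [PySem.List.slice, PySem.List.clampIdx, List.dropLast_eq_take]
    split <;> omega

theorem pvSlice_one {α : Type} (l : List α) : PySem.List.slice l (some 1) none = l.tail := by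
  have := PySem.List.slice_from l (a := 1) (by omega)
  simp at this
  simp [this]

theorem pvOkA_split (c : Char) :
    (PySem.Chars.isalnum c || PySem.Chars.isIn [c] ['-', '_', '.']) =
    ((PySem.Chars.isalnum c || PySem.Chars.isIn [c] ['-', '_']) || c == '.') := by
  rw [pvIsIn_singleton, pvIsIn_singleton]
  by_cases h : c = '.' <;> simp [h]

theorem pvDotNotOk : (PySem.Chars.isalnum '.' || PySem.Chars.isIn ['.'] ['-', '_']) = false := by
  decide

theorem pvBloop_go (l acc : List Char) :
    l.foldl (fun out c =>
      if PySem.Chars.isalnum c || PySem.Chars.isIn [c] ['-', '_'] then out ++ [c]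
      else if c = '.' ∧ (out = [] ∨ PySem.List.pyGet? out (-1) ≠ some '.') then out ++ [c]
      else out) acc
    = acc ++ pvCol (acc.getLast? == some '.')
        (l.filter (fun c => PySem.Chars.isalnum c || PySem.Chars.isIn [c] ['-', '_', '.'])) := by
  induction l generalizing acc with
  | nil => simp [pvCol]
  | cons c t ih =>
    simp only [List.foldl_cons, List.filter_cons]
    by_cases h1 : (PySem.Chars.isalnum c || PySem.Chars.isIn [c] ['-', '_']) = true
    · have hok : (PySem.Chars.isalnum c || PySem.Chars.isIn [c] ['-', '_', '.']) = true := by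
        rw [pvOkA_split]; simp [h1]
      have hcd : c ≠ '.' := by
        intro hc; subst hc; rw [pvDotNotOk] at h1; simp at h1
      rw [if_pos h1, if_pos hok, ih]
      simp only [List.getLast?_concat, List.append_assoc, List.singleton_append]
      rw [show (some c == some '.') = false from by simp [hcd]]
      simp [pvCol, hcd]
    · rw [if_neg h1]
      by_cases h2 : c = '.'
      · subst h2
        have hok : (PySem.Chars.isalnum '.' || PySem.Chars.isIn ['.'] ['-', '_', '.']) = true := by decide
        rw [if_pos hok]
        by_cases h3 : acc.getLast? = some '.'
        · rw [if_neg (by simp [pvGet_neg_one, h3]; rintro rfl; simp at h3)]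
          rw [ih]
          simp [pvCol, h3]
        · rw [if_pos ⟨rfl, by by_cases hacc : acc = [] <;> simp [hacc, pvGet_neg_one, h3]⟩]
          rw [ih]
          simp [pvCol, h3]
      · have hok : (PySem.Chars.isalnum c || PySem.Chars.isIn [c] ['-', '_', '.']) = false := by
          rw [pvOkA_split]; simp [h1, h2]
        rw [if_neg (by simp [h2]), if_neg (by simp [hok]), ih]

theorem pvDropWhile_dot_of_head {l : List Char} (h : l.head? ≠ some '.') :
    l.dropWhile (fun c => List.contains ['.'] c) = l := by
  cases l with
  | nil => rfl
  | cons a t =>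
    simp at h
    simp [h]

theorem pvLstrip_eq (a : List Char) (h : pvNoDD a = true) :
    a.dropWhile (fun c => List.contains ['.'] c) = if a.head? = some '.' then a.tail else a := by
  cases a with
  | nil => rfl
  | cons c t =>
    by_cases hc : c = '.'
    · subst hc
      rw [pvNoDD] at h
      simp at h
      have : t.head? ≠ some '.' := by simpa using h.1
      rw [show List.dropWhile (fun c => List.contains ['.'] c) ('.'::t) =
            List.dropWhile (fun c => List.contains ['.'] c) t from by simp]
      rw [pvDropWhile_dot_of_head this]
      simp
    · simp [hc]

theorem pvNoDD_reverse (a : List Char) (h : pvNoDD a = true) : pvNoDD a.reverse = true := by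
  rw [pvNoDD_iff] at h ⊢
  intro hdd
  have : ['.', '.'].reverse <:+: a.reverse.reverse := List.IsInfix.reverse hdd
  simp at this
  exact h this

theorem pvRstrip_eq (s : List Char) (h : pvNoDD s = true)
    (p : Char → Bool) (hp : p = fun c => List.contains ['.'] c) :
    (s.reverse.dropWhile p).reverse = if s.getLast? = some '.' then s.dropLast else s := by
  subst hp
  have hrev := pvNoDD_reverse s h
  rw [pvLstrip_eq s.reverse hrev]
  rw [List.head?_reverse]
  by_cases hl : s.getLast? = some '.'
  · simp only [hl, if_pos]
    rw [List.tail_reverse, List.reverse_reverse]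
  · simp [hl]

theorem pvApad_eq (a : List Char) (c : Char) (h : a.getLast? = some c) :
    pvApad a = a ++ List.replicate (3 - a.length) c := by
  match a with
  | [] => simp at h
  | [x] =>
    simp at h; subst h
    rw [pvApad]; simp [pvGet_neg_one]
    rw [pvApad]; simp [pvGet_neg_one]
    rw [pvApad]; simp
  | [x, y] =>
    simp at h; subst h
    rw [pvApad]; simp [pvGet_neg_one]
    rw [pvApad]; simp
  | x :: y :: z :: t =>
    rw [pvApad]
    simp

theorem pvAfilt_eq (L : List Char) :
    L.foldl (fun acc c =>
      if PySem.Chars.isalnum c || PySem.Chars.isIn [c] ['-', '_', '.'] then acc ++ [c] else acc) []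
    = L.filter (fun c => PySem.Chars.isalnum c || PySem.Chars.isIn [c] ['-', '_', '.']) := by
  have := PySem.List.foldl_append_if
    (p := fun c => PySem.Chars.isalnum c || PySem.Chars.isIn [c] ['-', '_', '.'])
    (f := fun c : Char => c) L []
  simpa using this

theorem solution_eq_core (new_id : String) : solution new_id = solution_alt new_id := by
  unfold solution solution_alt
  dsimp only
  rw [pvAfilt_eq, pvBloop_go]
  simp only [List.getLast?_nil, List.nil_append, pvAcollapse_eq,
    show ((none : Option Char) == some '.') = false from rfl]
  set g := pvCol false (List.filter (fun c => PySem.Chars.isalnum c || PySem.Chars.isIn [c] ['-', '_', '.'])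
      (PySem.Str.lower new_id).toList) with hgdef
  have hg : pvNoDD g = true := (pvNoDD_pvCol _ false).1
  have hbeq : (fun c => c == '.') = (fun c => List.contains ['.'] c) := by
    funext c; by_cases h : c = '.' <;> simp [h]
  have ha4a : (if g ≠ [] ∧ PySem.List.pyGet? g 0 = some '.' then PySem.List.slice g (some 1) none else g)
      = (if g.head? = some '.' then g.tail else g) := by
    rw [pvGet_zero, pvSlice_one]
    cases g <;> simp
  rw [ha4a]
  set u := if g.head? = some '.' then g.tail else g with hudef
  have hu : pvNoDD u = true := by
    rw [hudef]
    split
    · exact pvNoDD_of_infix hg (List.tail_suffix g).isInfix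
    · exact hg
  have ha4 : (if u ≠ [] ∧ PySem.List.pyGet? u (-1) = some '.' then PySem.List.slice u none (some (-1)) else u)
      = (if u.getLast? = some '.' then u.dropLast else u) := by
    rw [pvGet_neg_one, pvSlice_neg_one]
    cases u <;> simp
  rw [ha4]
  have hstrip : PySem.Chars.stripChars g ['.']
      = (if u.getLast? = some '.' then u.dropLast else u) := by
    rw [PySem.Chars.stripChars]
    rw [pvLstrip_eq g hg, ← hudef]
    exact pvRstrip_eq u hu _ rfl
  rw [hstrip]
  set v := if u.getLast? = some '.' then u.dropLast else u with hvdef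
  have hv : pvNoDD v = true := by
    rw [hvdef]; split
    · exact pvNoDD_of_infix hu (List.dropLast_prefix u).isInfix
    · exact hu
  set s5 := if v = [] then ['a'] else v with hs5def
  have hs5 : pvNoDD s5 = true := by
    rw [hs5def]; split
    · decide
    · exact hv
  have hs5ne : s5 ≠ [] := by
    rw [hs5def]; split
    · simp
    · assumption
  have h15 : PySem.List.slice s5 none (some 15) = s5.take 15 := by
    rw [PySem.List.slice_to s5 (b := 15) (by omega)]
    rfl
  have hrs : pvBrstripDots (s5.take 15)
      = (if (s5.take 15).getLast? = some '.' then (s5.take 15).dropLast else s5.take 15) := by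
    rw [pvBrstripDots, hbeq]
    exact pvRstrip_eq _ (pvNoDD_of_infix hs5 (List.take_prefix 15 s5).isInfix) _ rfl
  rw [h15, hrs]
  have hinner : (if PySem.List.pyGet? (s5.take 15) (-1) = some '.'
        then PySem.List.slice (s5.take 15) none (some (-1)) else s5.take 15)
      = (if (s5.take 15).getLast? = some '.' then (s5.take 15).dropLast else s5.take 15) := by
    rw [pvGet_neg_one, pvSlice_neg_one]
  rw [hinner]
  set s2 := if 16 ≤ s5.length
      then (if (s5.take 15).getLast? = some '.' then (s5.take 15).dropLast else s5.take 15)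
      else s5 with hs2def
  have hs2ne : s2 ≠ [] := by
    rw [hs2def]
    split
    · have hlen : (s5.take 15).length = 15 := by
        rw [List.length_take]; omega
      split
      · intro hnil
        have := congrArg List.length hnil
        rw [List.length_dropLast, hlen] at this
        simp at this
      · intro hnil
        have := congrArg List.length hnil
        rw [hlen] at this
        simp at this
    · exact hs5ne
  obtain ⟨c, hc⟩ : ∃ c, s2.getLast? = some c := by
    cases hlast : s2.getLast? with
    | none => exact absurd (List.getLast?_eq_none_iff.1 hlast) hs2ne
    | some c => exact ⟨c, rfl⟩
  rw [pvGet_neg_one, hc, pvApad_eq s2 c hc]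

-- ===== VERDICT (by name: the statement is the Claim_ definition above) =====
theorem solution_spec : Claim_equal_solution := by
  intro new_id _
  unfold Spec_solution
  exact solution_eq_core new_id
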